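-- pv_equiv track=rewrite | github.com/Lupino/python-psql-utils | psql_utils/record.py | sort_query
-- ===== SOURCE A (Python) =====
-- from typing import Optional, List, Dict, Any, Callable
--
-- def sort_query(
--     query: List[tuple[str, str, Any]],
--     sort_keys: List[str],
-- ) -> List[tuple[str, str, Any]]:
--     ret = []
--     for key in sort_keys:
--         other = []
--         for q in query:
--             if q[0] == key:
--                 ret.append(q)
--             else:
--                 other.append(q)
--
--         query = other
--
--     return ret + query
-- ===== SOURCE B (Python) =====
-- def sort_query(query, sort_keys):
--     key_set = set(sort_keys)
--     buckets = {}
--     rest = []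
--     for q in query:
--         if q[0] in key_set:
--             buckets.setdefault(q[0], []).append(q)
--         else:
--             rest.append(q)
--     ret = []
--     seen = set()
--     for key in sort_keys:
--         if key not in seen:
--             seen.add(key)
--             ret.extend(buckets.get(key, []))
--     return ret + rest
-- ===== Notes on version B (the rewrite author's own statement) =====
-- stated objective: faster
-- what changed: A rescans and repartitions the remaining query once per sort key; B makes one bucketing pass over the query (dict keyed by tuple head, plus a rest list) and one deduplicating pass over sort_keys that concatenates the buckets.
import Mathlib
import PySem

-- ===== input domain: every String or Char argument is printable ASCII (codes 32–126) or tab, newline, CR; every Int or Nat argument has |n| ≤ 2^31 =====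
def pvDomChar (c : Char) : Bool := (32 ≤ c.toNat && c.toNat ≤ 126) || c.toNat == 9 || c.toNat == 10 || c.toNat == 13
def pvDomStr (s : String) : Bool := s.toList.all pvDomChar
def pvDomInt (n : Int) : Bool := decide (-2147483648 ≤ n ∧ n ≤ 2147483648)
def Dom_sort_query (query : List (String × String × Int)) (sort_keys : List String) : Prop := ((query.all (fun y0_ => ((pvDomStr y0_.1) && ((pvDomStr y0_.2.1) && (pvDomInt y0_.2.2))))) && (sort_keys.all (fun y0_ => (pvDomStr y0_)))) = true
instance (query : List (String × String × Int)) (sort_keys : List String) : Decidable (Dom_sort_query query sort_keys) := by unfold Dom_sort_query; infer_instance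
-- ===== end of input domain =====

-- B replaces A's k scan-and-partition passes over the query by one bucketing pass plus one
-- deduplicating pass over sort_keys (faster: O(n+k) instead of O(n*k)).


-- ===== PORT A =====
-- literal transliteration: for each key, one pass over the remaining query splits it
-- into matches (appended to ret) and others; finally ret + leftover query
def sort_query (query : List (String × String × Int)) (sort_keys : List String) : List (String × String × Int) :=
  let st := sort_keys.foldl
    (fun (st : List (String × String × Int) × List (String × String × Int)) key =>
      st.2.foldl
        (fun (st2 : List (String × String × Int) × List (String × String × Int)) q =>
          if q.1 == key then (st2.1 ++ [q], st2.2) else (st2.1, st2.2 ++ [q]))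
        (st.1, []))
    ([], query)
  st.1 ++ st.2

-- ===== PORT B =====
-- literal transliteration of Source B: one pass over query builds buckets (dict) and rest,
-- then one pass over sort_keys (with a seen-set) concatenates the buckets
def sort_query_alt (query : List (String × String × Int)) (sort_keys : List String) : List (String × String × Int) :=
  let keySet := PySem.Set.ofList sort_keys
  let br := query.foldl
    (fun (st : PySem.Dict String (List (String × String × Int)) × List (String × String × Int)) q =>
      if keySet.contains q.1 then (st.1.modify q.1 [] (fun l => l ++ [q]), st.2)
      else (st.1, st.2 ++ [q]))
    (PySem.Dict.empty, [])
  let rs := sort_keys.foldl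
    (fun (st : List (String × String × Int) × PySem.Set String) key =>
      if st.2.contains key then st
      else (st.1 ++ br.1.getD key [], st.2.add key))
    ([], ∅)
  rs.1 ++ br.2

-- ===== PRECONDITION & SPEC =====
def Spec_sort_query (query : List (String × String × Int)) (sort_keys : List String) (out : List (String × String × Int)) : Prop := out = sort_query_alt query sort_keys
instance (query : List (String × String × Int)) (sort_keys : List String) (out : List (String × String × Int)) : Decidable (Spec_sort_query query sort_keys out) := by unfold Spec_sort_query; infer_instance

-- ===== CLAIM (what is proved, stated in full; the proofs are below) =====
def Claim_equal_sort_query : Prop := ∀ (query : List (String × String × Int)) (sort_keys : List String), Dom_sort_query query sort_keys → Spec_sort_query query sort_keys (sort_query query sort_keys)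

-- ===== LEMMAS AND PROOFS =====

-- recursive characterisation of A: peel one key, partition, recurse
def specA : List (String × String × Int) → List String → List (String × String × Int)
  | q, [] => q
  | q, k :: ks => q.filter (fun t => t.1 == k) ++ specA (q.filter (fun t => !(t.1 == k))) ks

-- selection loop: for each unseen key emit f key (the spec of B's second pass)
def selL (f : String → List (String × String × Int)) : PySem.Set String → List String → List (String × String × Int)
  | _, [] => []
  | s, k :: ks => if s.contains k then selL f s ks else f k ++ selL f (s.add k) ks

lemma set_contains_add (s : PySem.Set String) (k x : String) :
    (s.add k).contains x = (s.contains x || x == k) := by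
  simp only [PySem.Set.contains]
  by_cases h : x ∈ s.add k
  · simp [h, (PySem.Set.mem_add s k x).mp h]
  · have := (PySem.Set.mem_add s k x).not.mp h
    push_neg at this
    simp [h, this.1, this.2]

lemma not_mem_of_contains_false (s : PySem.Set String) (x : String)
    (h : s.contains x = false) : x ∉ s := by
  intro hm
  rw [(PySem.Set.contains_iff s x).mpr hm] at h
  exact Bool.noConfusion h

-- A's inner pass is a partition
lemma innerA (key : String) : ∀ (q r o : List (String × String × Int)),
    q.foldl (fun (st2 : List (String × String × Int) × List (String × String × Int)) t =>
        if t.1 == key then (st2.1 ++ [t], st2.2) else (st2.1, st2.2 ++ [t])) (r, o)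
      = (r ++ q.filter (fun t => t.1 == key), o ++ q.filter (fun t => !(t.1 == key))) := by
  intro q
  induction q with
  | nil => intro r o; simp
  | cons t q ih =>
    intro r o
    rw [List.foldl_cons]
    by_cases h : (t.1 == key) = true
    · rw [if_pos h, ih]
      simp [List.filter_cons, h]
    · rw [if_neg h, ih]
      rw [Bool.not_eq_true] at h
      simp [List.filter_cons, h]

-- A's outer loop computes specA
lemma outerA : ∀ (ks : List String) (r q : List (String × String × Int)),
    (ks.foldl (fun (st : List (String × String × Int) × List (String × String × Int)) key =>
        st.2.foldl (fun (st2 : List (String × String × Int) × List (String × String × Int)) t =>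
          if t.1 == key then (st2.1 ++ [t], st2.2) else (st2.1, st2.2 ++ [t])) (st.1, []))
      (r, q)).1
    ++ (ks.foldl (fun (st : List (String × String × Int) × List (String × String × Int)) key =>
        st.2.foldl (fun (st2 : List (String × String × Int) × List (String × String × Int)) t =>
          if t.1 == key then (st2.1 ++ [t], st2.2) else (st2.1, st2.2 ++ [t])) (st.1, []))
      (r, q)).2
    = r ++ specA q ks := by
  intro ks
  induction ks with
  | nil => intro r q; simp [specA]
  | cons k ks ih =>
    intro r q
    simp only [List.foldl_cons, innerA k q r [], List.nil_append, specA]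
    rw [ih]
    simp

lemma sort_query_eq_specA (q : List (String × String × Int)) (ks : List String) :
    sort_query q ks = specA q ks := by
  unfold sort_query
  simpa using outerA ks [] q

-- B's bucketing pass: the bucket of a key in the key set is exactly the filter
lemma bucketsB (S : PySem.Set String) :
    ∀ (q : List (String × String × Int))
      (d : PySem.Dict String (List (String × String × Int)))
      (rest : List (String × String × Int)) (k : String), S.contains k = true →
    ((q.foldl (fun (st : PySem.Dict String (List (String × String × Int)) × List (String × String × Int)) t =>
        if S.contains t.1 then (st.1.modify t.1 [] (fun l => l ++ [t]), st.2)
        else (st.1, st.2 ++ [t])) (d, rest)).1).getD k []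
      = d.getD k [] ++ q.filter (fun t => t.1 == k) := by
  intro q
  induction q with
  | nil => intro d rest k hk; simp
  | cons t q ih =>
    intro d rest k hk
    rw [List.foldl_cons]
    by_cases hS : S.contains t.1 = true
    · rw [if_pos hS]
      by_cases htk : t.1 = k
      · subst htk
        rw [ih _ _ _ hk, PySem.Dict.getD_modify_self]
        simp [List.filter_cons]
      · rw [ih _ _ _ hk, PySem.Dict.getD_modify_of_ne d [] _ (Ne.symm htk)]
        simp [htk]
    · rw [if_neg hS, ih _ _ _ hk]
      rw [Bool.not_eq_true] at hS
      have htk : (t.1 == k) = false := by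
        rw [beq_eq_false_iff_ne]
        intro h; rw [h, hk] at hS; exact Bool.noConfusion hS
      simp [List.filter_cons, htk]

-- B's bucketing pass: rest collects exactly the tuples whose key is not in the set
lemma restB (S : PySem.Set String) :
    ∀ (q : List (String × String × Int))
      (d : PySem.Dict String (List (String × String × Int)))
      (rest : List (String × String × Int)),
    (q.foldl (fun (st : PySem.Dict String (List (String × String × Int)) × List (String × String × Int)) t =>
        if S.contains t.1 then (st.1.modify t.1 [] (fun l => l ++ [t]), st.2)
        else (st.1, st.2 ++ [t])) (d, rest)).2
      = rest ++ q.filter (fun t => !(S.contains t.1)) := by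
  intro q
  induction q with
  | nil => intro d rest; simp
  | cons t q ih =>
    intro d rest
    rw [List.foldl_cons]
    by_cases hS : S.contains t.1 = true
    · rw [if_pos hS, ih]
      simp [(PySem.Set.contains_iff S t.1).mp hS]
    · rw [if_neg hS, ih]
      rw [Bool.not_eq_true] at hS
      simp [not_mem_of_contains_false S t.1 hS]

-- B's second pass computes selL
lemma selB (f : String → List (String × String × Int)) :
    ∀ (ks : List String) (r : List (String × String × Int)) (s : PySem.Set String),
    (ks.foldl (fun (st : List (String × String × Int) × PySem.Set String) key =>
        if st.2.contains key then st else (st.1 ++ f key, st.2.add key)) (r, s)).1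
      = r ++ selL f s ks := by
  intro ks
  induction ks with
  | nil => intro r s; simp [selL]
  | cons k ks ih =>
    intro r s
    rw [List.foldl_cons]
    by_cases h : s.contains k = true
    · rw [if_pos h, ih]
      simp only [selL, h, if_true]
    · rw [if_neg h, ih]
      simp only [selL]
      rw [if_neg h, List.append_assoc]

lemma selL_congr (f g : String → List (String × String × Int)) :
    ∀ (ks : List String) (s : PySem.Set String),
    (∀ k, s.contains k = false → k ∈ ks → f k = g k) →
    selL f s ks = selL g s ks := by
  intro ks
  induction ks with
  | nil => intro s _; rfl
  | cons k ks ih =>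
    intro s h
    by_cases hc : s.contains k = true
    · simp only [selL, hc, if_true]
      exact ih s (fun k' h1 h2 => h k' h1 (List.mem_cons_of_mem _ h2))
    · simp only [selL]
      rw [if_neg hc, if_neg hc]
      rw [h k (Bool.eq_false_iff.mpr hc) List.mem_cons_self]
      rw [ih (s.add k)]
      intro k' h1 h2
      rw [set_contains_add] at h1
      exact h k' (Bool.or_eq_false_iff.mp h1).1 (List.mem_cons_of_mem _ h2)

-- the key lemma: specA equals B's selection plus the untouched remainder
lemma specA_eq_sel :
    ∀ (ks : List String) (q : List (String × String × Int)) (s : PySem.Set String),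
    (∀ t ∈ q, s.contains t.1 = false) →
    specA q ks = selL (fun k => q.filter (fun t => t.1 == k)) s ks
                 ++ q.filter (fun t => !(ks.contains t.1)) := by
  intro ks
  induction ks with
  | nil =>
    intro q s _
    simp [specA, selL]
  | cons k ks ih =>
    intro q s hq
    by_cases hc : s.contains k = true
    · have hne : ∀ t ∈ q, (t.1 == k) = false := by
        intro t ht
        rw [beq_eq_false_iff_ne]
        intro h
        have := hq t ht
        rw [h, hc] at this
        exact Bool.noConfusion this
      have h1 : q.filter (fun t => t.1 == k) = [] :=
        List.filter_eq_nil_iff.mpr (fun t ht => by simp [hne t ht])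
      have h2 : q.filter (fun t => !(t.1 == k)) = q :=
        List.filter_eq_self.mpr (fun t ht => by simp [hne t ht])
      have h3 : q.filter (fun t => !((k :: ks).contains t.1))
              = q.filter (fun t => !(ks.contains t.1)) := by
        apply List.filter_congr
        intro t ht
        rw [List.contains_cons, hne t ht, Bool.false_or]
      simp only [specA, h1, h2, List.nil_append, selL, hc, if_true, h3]
      exact ih q s hq
    · have hq' : ∀ t ∈ q.filter (fun t => !(t.1 == k)), (s.add k).contains t.1 = false := by
        intro t ht
        rw [List.mem_filter] at ht
        rw [set_contains_add]
        rw [hq t ht.1]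
        have h2 := ht.2
        rw [Bool.not_eq_eq_eq_not, Bool.not_true] at h2
        rw [h2]
        rfl
      have ihq := ih (q.filter (fun t => !(t.1 == k))) (s.add k) hq'
      have hsel : selL (fun k' => (q.filter (fun t => !(t.1 == k))).filter (fun t => t.1 == k')) (s.add k) ks
                = selL (fun k' => q.filter (fun t => t.1 == k')) (s.add k) ks := by
        apply selL_congr
        intro k' h1 _
        rw [set_contains_add] at h1
        have hk'k : ¬ k' = k := beq_eq_false_iff_ne.mp (Bool.or_eq_false_iff.mp h1).2
        rw [List.filter_filter]
        apply List.filter_congr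
        intro t _
        by_cases h : t.1 = k'
        · have e1 : (t.1 == k') = true := beq_iff_eq.mpr h
          have e2 : (t.1 == k) = false := by
            rw [beq_eq_false_iff_ne]
            intro hh; exact hk'k (h.symm.trans hh)
          simp [e1, e2]
        · have e1 : (t.1 == k') = false := beq_eq_false_iff_ne.mpr h
          simp [e1]
      have hrem : (q.filter (fun t => !(t.1 == k))).filter (fun t => !(ks.contains t.1))
                = q.filter (fun t => !((k :: ks).contains t.1)) := by
        rw [List.filter_filter]
        apply List.filter_congr
        intro t _
        rw [List.contains_cons, Bool.not_or, Bool.and_comm]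
      simp only [specA, selL]
      rw [if_neg hc, ihq, hsel, hrem, List.append_assoc]

lemma ofList_contains_eq (l : List String) (x : String) :
    (PySem.Set.ofList l).contains x = l.contains x := by
  by_cases h : x ∈ l
  · simp [PySem.Set.contains, (PySem.Set.mem_ofList l x).mpr h, h]
  · simp [PySem.Set.contains, (PySem.Set.mem_ofList l x).not.mpr h, h]

lemma altB (q : List (String × String × Int)) (ks : List String) :
    sort_query_alt q ks = selL (fun k => q.filter (fun t => t.1 == k)) ∅ ks
      ++ q.filter (fun t => !(ks.contains t.1)) := by
  unfold sort_query_alt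
  simp only [selB, restB, List.nil_append]
  have h1 : selL (fun k =>
      ((q.foldl (fun (st : PySem.Dict String (List (String × String × Int)) × List (String × String × Int)) t =>
        if (PySem.Set.ofList ks).contains t.1 then (st.1.modify t.1 [] (fun l => l ++ [t]), st.2)
        else (st.1, st.2 ++ [t])) (PySem.Dict.empty, [])).1).getD k []) ∅ ks
      = selL (fun k => q.filter (fun t => t.1 == k)) ∅ ks := by
    apply selL_congr
    intro k _ hk
    rw [bucketsB (PySem.Set.ofList ks) q PySem.Dict.empty [] k
      (by rw [ofList_contains_eq]; exact List.contains_iff_mem.mpr hk)]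
    rfl
  rw [h1]
  congr 1
  apply List.filter_congr
  intro t _
  rw [ofList_contains_eq]

-- ===== VERDICT (by name: the statement is the Claim_ definition above) =====
theorem sort_query_spec : Claim_equal_sort_query := by
  unfold Claim_equal_sort_query
  intro query sort_keys _
  unfold Spec_sort_query
  rw [sort_query_eq_specA, altB]
  exact specA_eq_sel sort_keys query ∅ (fun t _ => rfl)
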